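-- pv_equiv track=rewrite | github.com/bettyballin/sequenceTagger | previouslyTried/task3.py | to_spans
-- ===== SOURCE A (Python) =====
-- def to_spans(l_ids, voc):
--     spans = {}
--     current_lbl = None
--     current_start = None
--     for i, l_id in enumerate(l_ids):
--         l = voc[l_id]
--
--         if l[0] == 'B':
--             # Beginning of a named entity: B-something.
--             if current_lbl:
--                 # If we're working on an entity, close it.
--                 spans[current_start] = (current_lbl, i)
--             # Create a new entity that starts here.
--             current_lbl = l[2:]
--             current_start = i
--         elif l[0] == 'I':
--             # Continuation of an entity: I-something.
--             if current_lbl: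
--                 # If we have an open entity, but its label does not
--                 # correspond to the predicted I-tag, then we close
--                 # the open entity and create a new one.
--                 if current_lbl != l[2:]:
--                     spans[current_start] = (current_lbl, i)
--                     current_lbl = l[2:]
--                     current_start = i
--             else:
--                 # If we don't have an open entity but predict an I tag,
--                 # we create a new entity starting here even though we're
--                 # not following the format strictly.
--                 current_lbl = l[2:]
--                 current_start = i
--         else:
--             # Outside: O.
--             if current_lbl:
--                 # If we have an open entity, we close it.
--                 spans[current_start] = (current_lbl, i)
--                 current_lbl = None
--                 current_start = None
--     return spans
-- ===== SOURCE B (Python) =====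
-- def to_spans(l_ids, voc):
--     # Nested index walk: the outer loop looks for a well-formed entity tag
--     # ('B-XXX' / 'I-XXX': first char B or I and a nonempty type after the dash),
--     # the inner loop scans its matching 'I' continuations, then the span is recorded.
--     spans = {}
--     n = len(l_ids)
--     i = 0
--     while i < n:
--         tag = voc[l_ids[i]]
--         if len(tag) > 2 and (tag[0] == 'B' or tag[0] == 'I'):
--             label = tag[2:]
--             j = i + 1
--             while j < n and voc[l_ids[j]][0] == 'I' and voc[l_ids[j]][2:] == label:
--                 j += 1
--             spans[i] = (label, j)
--             i = j
--         else:
--             i += 1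
--     return spans
-- ===== Notes on version B (the rewrite author's own statement) =====
-- stated objective: alternative
-- what changed: A's single pass with an open-entity state machine (current_lbl/current_start mutated per token) is replaced by a nested index walk: an outer loop that looks for a well-formed entity tag and an inner loop that scans its matching 'I' continuations, recording each found span; Pre_ excludes only the inputs where A raises IndexError (an id that is not a valid index into voc, or an empty tag string).
-- intended difference: On inputs whose last token carries a well-formed 'B-XXX'/'I-XXX' entity tag, A silently drops the entity that is still open at the end of the sequence while B records its span with end = len(l_ids); an entity reaching the end of the sequence is a real entity, so recording it is the intended behaviour. — e.g. on to_spans([0], ["B-PER"]): A returns [], B returns [(0, "PER", 1)]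
-- outside the precondition, e.g. on to_spans([0], ['']): A raises IndexError, B returns {}; on to_spans([5], ['O']): A raises IndexError, B raises IndexError
import Mathlib
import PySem

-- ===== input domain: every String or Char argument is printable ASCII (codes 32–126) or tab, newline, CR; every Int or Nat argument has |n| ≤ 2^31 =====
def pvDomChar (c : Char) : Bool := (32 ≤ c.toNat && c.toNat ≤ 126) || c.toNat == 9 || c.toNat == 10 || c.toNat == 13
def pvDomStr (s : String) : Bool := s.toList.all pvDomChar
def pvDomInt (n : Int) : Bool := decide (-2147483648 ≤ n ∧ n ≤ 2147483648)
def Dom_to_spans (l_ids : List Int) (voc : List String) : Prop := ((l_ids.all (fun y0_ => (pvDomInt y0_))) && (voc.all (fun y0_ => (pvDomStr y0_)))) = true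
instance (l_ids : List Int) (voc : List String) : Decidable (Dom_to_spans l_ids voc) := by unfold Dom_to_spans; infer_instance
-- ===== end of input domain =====

-- B replaces A's single-pass open-entity state machine by a nested index walk
-- (outer loop looks for a well-formed entity tag, inner loop scans its
-- continuations, the span is recorded where the scan stops); objective:
-- alternative.  B intentionally also records an entity still open at the end
-- of the sequence, which A drops (D_ below).

-- ===== PORT A =====
-- Python truthiness of current_lbl (None or a string): falsy iff None or "".
def truthyA : Option String → Bool
  | none => false
  | some s => !(s == "")

-- one iteration of A's for-loop body; p = (i, l_id) from enumerate.
def stepA (voc : List String)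
    (s : PySem.Dict Int (String × Int) × Option String × Option Int)
    (p : Int × Int) : PySem.Dict Int (String × Int) × Option String × Option Int :=
  -- s = (spans, current_lbl, current_start); l := voc[l_id] (IndexError excluded by Pre_)
  if PySem.Str.pyGet? ((PySem.List.pyGet? voc p.2).getD "") 0 = some 'B' then
    ((if truthyA s.2.1 then s.1.insert (s.2.2.getD 0) (s.2.1.getD "", p.1) else s.1),
     some (PySem.Str.slice ((PySem.List.pyGet? voc p.2).getD "") (some 2) none), some p.1)
  else if PySem.Str.pyGet? ((PySem.List.pyGet? voc p.2).getD "") 0 = some 'I' then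
    if truthyA s.2.1 then
      if s.2.1.getD "" ≠ PySem.Str.slice ((PySem.List.pyGet? voc p.2).getD "") (some 2) none then
        (s.1.insert (s.2.2.getD 0) (s.2.1.getD "", p.1),
         some (PySem.Str.slice ((PySem.List.pyGet? voc p.2).getD "") (some 2) none), some p.1)
      else s
    else (s.1, some (PySem.Str.slice ((PySem.List.pyGet? voc p.2).getD "") (some 2) none), some p.1)
  else
    if truthyA s.2.1 then
      (s.1.insert (s.2.2.getD 0) (s.2.1.getD "", p.1), none, none)
    else s

def to_spans (l_ids : List Int) (voc : List String) : List (Int × String × Int) :=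
  ((PySem.List.enumerate l_ids).foldl (stepA voc) (PySem.Dict.empty, none, none)).1.items

-- ===== PORT B =====
-- inner while loop of Source B: advance j past matching 'I' continuations.
def altScan (l_ids : List Int) (voc : List String) (label : String) (j : Nat) : Nat :=
  if h : j < l_ids.length then
    if PySem.Str.pyGet? ((PySem.List.pyGet? voc l_ids[j]).getD "") 0 = some 'I'
        ∧ PySem.Str.slice ((PySem.List.pyGet? voc l_ids[j]).getD "") (some 2) none = label then
      altScan l_ids voc label (j + 1)
    else j
  else j
termination_by l_ids.length - j

theorem altScan_ge (l_ids : List Int) (voc : List String) (label : String) :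
    ∀ j, j ≤ altScan l_ids voc label j := by
  intro j
  induction hf : l_ids.length - j using Nat.strong_induction_on generalizing j with
  | _ n ih =>
    rw [altScan]
    split
    · split
      · have h1 : j ≤ altScan l_ids voc label (j + 1) := by
          exact ih (l_ids.length - (j+1)) (by omega) (j+1) rfl |>.trans' (by omega)
        omega
      · omega
    · omega

-- outer while loop of Source B.
def altOuter (l_ids : List Int) (voc : List String) (i : Nat)
    (spans : PySem.Dict Int (String × Int)) : PySem.Dict Int (String × Int) :=
  if h : i < l_ids.length then
    if 2 < PySem.Str.len ((PySem.List.pyGet? voc l_ids[i]).getD "")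
        ∧ (PySem.Str.pyGet? ((PySem.List.pyGet? voc l_ids[i]).getD "") 0 = some 'B'
           ∨ PySem.Str.pyGet? ((PySem.List.pyGet? voc l_ids[i]).getD "") 0 = some 'I') then
      altOuter l_ids voc
        (altScan l_ids voc (PySem.Str.slice ((PySem.List.pyGet? voc l_ids[i]).getD "") (some 2) none) (i + 1))
        (spans.insert (i : Int)
          (PySem.Str.slice ((PySem.List.pyGet? voc l_ids[i]).getD "") (some 2) none,
           (altScan l_ids voc (PySem.Str.slice ((PySem.List.pyGet? voc l_ids[i]).getD "") (some 2) none) (i + 1) : Int)))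
    else altOuter l_ids voc (i + 1) spans
  else spans
termination_by l_ids.length - i
decreasing_by
  · have := altScan_ge l_ids voc (PySem.Str.slice ((PySem.List.pyGet? voc l_ids[i]).getD "") (some 2) none) (i + 1)
    omega
  · omega

def to_spans_alt (l_ids : List Int) (voc : List String) : List (Int × String × Int) :=
  (altOuter l_ids voc 0 PySem.Dict.empty).items

-- ===== PRECONDITION & SPEC =====
-- Pre_ excludes exactly the inputs on which Python A raises IndexError: an id
-- that is not a valid Python index into voc, or one whose tag is the empty string.
def Pre_to_spans (l_ids : List Int) (voc : List String) : Prop :=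
  ∀ x ∈ l_ids, (PySem.List.pyGet? voc x).getD "" ≠ ""
instance (l_ids : List Int) (voc : List String) : Decidable (Pre_to_spans l_ids voc) := by
  unfold Pre_to_spans; infer_instance

def pvWitness_to_spans : List Int × List String :=
  ([0, 1, 2, 1], ["B-PER", "I-PER", "O"])

-- the BIO tag named by id x (Python indexing: negative = from the end; ""
-- when there is no such tag); used only to state D_.
def pvTag (voc : List String) (x : Int) : String :=
  if 0 ≤ x then voc.getD x.toNat "" else voc.getD (voc.length - (-x).toNat) ""

-- On inputs whose last token carries a well-formed 'B-XXX'/'I-XXX' entity tag, A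
-- silently drops the entity still open at the end of the sequence, while B records
-- its span with end = len(l_ids); an entity reaching the end is a real entity, so
-- recording it is the intended behaviour.
def D_to_spans (l_ids : List Int) (voc : List String) : Prop :=
  l_ids ≠ [] ∧ 2 < (pvTag voc (l_ids.getLast?.getD 0)).toList.length ∧
    ((pvTag voc (l_ids.getLast?.getD 0)).toList.headD ' ' = 'B' ∨
     (pvTag voc (l_ids.getLast?.getD 0)).toList.headD ' ' = 'I')
instance (l_ids : List Int) (voc : List String) : Decidable (D_to_spans l_ids voc) := by
  unfold D_to_spans; infer_instance

def Spec_to_spans (l_ids : List Int) (voc : List String) (out : List (Int × String × Int)) : Prop := ¬ D_to_spans l_ids voc → out = to_spans_alt l_ids voc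
instance (l_ids : List Int) (voc : List String) (out : List (Int × String × Int)) : Decidable (Spec_to_spans l_ids voc out) := by unfold Spec_to_spans; infer_instance

def pvDiffWitness_to_spans : List Int × List String := ([0], ["B-PER"])
def pvDiffWitnessOut_to_spans : (List (Int × String × Int)) × (List (Int × String × Int)) :=
  ([], [(0, "PER", 1)])

-- ===== CLAIM (what is proved, stated in full; the proofs are below) =====
def Claim_unchanged_to_spans : Prop := ∀ (l_ids : List Int) (voc : List String), Dom_to_spans l_ids voc → Pre_to_spans l_ids voc → Spec_to_spans l_ids voc (to_spans l_ids voc)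
def Claim_changed_to_spans : Prop := Dom_to_spans (pvDiffWitness_to_spans.1) (pvDiffWitness_to_spans.2) ∧ Pre_to_spans (pvDiffWitness_to_spans.1) (pvDiffWitness_to_spans.2) ∧ D_to_spans (pvDiffWitness_to_spans.1) (pvDiffWitness_to_spans.2) ∧ to_spans (pvDiffWitness_to_spans.1) (pvDiffWitness_to_spans.2) = pvDiffWitnessOut_to_spans.1 ∧ to_spans_alt (pvDiffWitness_to_spans.1) (pvDiffWitness_to_spans.2) = pvDiffWitnessOut_to_spans.2 ∧ pvDiffWitnessOut_to_spans.1 ≠ pvDiffWitnessOut_to_spans.2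

-- ===== LEMMAS AND PROOFS =====

-- A's fold over enumerate, rephrased as an index recursion (proof device).
def loopA (l_ids : List Int) (voc : List String) (i : Nat)
    (s : PySem.Dict Int (String × Int) × Option String × Option Int) :
    PySem.Dict Int (String × Int) × Option String × Option Int :=
  if h : i < l_ids.length then
    loopA l_ids voc (i + 1) (stepA voc s ((i : Int), l_ids[i]))
  else s
termination_by l_ids.length - i

theorem foldl_drop_eq_loopA (l_ids : List Int) (voc : List String) :
    ∀ i s, ((PySem.List.enumerate l_ids).drop i).foldl (stepA voc) s = loopA l_ids voc i s := by
  intro i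
  induction hf : l_ids.length - i using Nat.strong_induction_on generalizing i with
  | _ n ih =>
    intro s
    rw [loopA]
    split
    · next h =>
      have hlen : i < (PySem.List.enumerate l_ids).length := by
        simpa [PySem.List.length_enumerate] using h
      rw [List.drop_eq_getElem_cons hlen, List.foldl_cons]
      have he : (PySem.List.enumerate l_ids)[i] = ((i : Int), l_ids[i]) := by
        simp [PySem.List.getElem_enumerate]
      rw [he]
      exact ih (l_ids.length - (i + 1)) (by omega) (i + 1) rfl _
    · next h =>
      have : (PySem.List.enumerate l_ids).length ≤ i := by
        simp [PySem.List.length_enumerate]; omega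
      rw [List.drop_eq_nil_of_le this, List.foldl_nil]

-- pvTag agrees with Python's voc[x] wherever the latter does not raise.
theorem pvTag_getD (voc : List String) (x : Int)
    (h : PySem.List.pyGet? voc x ≠ none) :
    pvTag voc x = (PySem.List.pyGet? voc x).getD "" := by
  unfold pvTag
  by_cases hx : 0 ≤ x
  · rw [if_pos hx, PySem.List.pyGet?_of_nonneg _ hx, List.getD_eq_getElem?_getD]
  · have hk0 : 0 < (-x).toNat := by omega
    by_cases hk : (-x).toNat ≤ voc.length
    · have hx' : x = -(((-x).toNat : Nat) : Int) := by omega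
      rw [if_neg hx, hx', PySem.List.pyGet?_neg_natCast _ _ hk0 hk,
        List.getD_eq_getElem?_getD]
      simp only [Int.neg_neg]
      have h4 : ((-x).toNat : Int).toNat = (-x).toNat := by omega
      rw [h4]
    · exfalso
      apply h
      rw [PySem.List.pyGet?_eq_none_iff]
      unfold PySem.Raise.InRange
      omega

-- a string whose first Python character is c has c as head of its char list.
theorem headD_of_strGet (s : String) (c : Char)
    (h : PySem.Str.pyGet? s 0 = some c) : s.toList.headD ' ' = c := by
  have h' : PySem.List.pyGet? s.toList 0 = some c := by simpa using h
  rw [PySem.List.pyGet?_zero] at h'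
  cases hs : s.toList with
  | nil => rw [hs] at h'; simp at h'
  | cons a l => rw [hs] at h'; simp_all

-- tag[2:] is empty exactly when the tag has at most two characters.
theorem slice2_empty_iff (s : String) :
    PySem.Str.slice s (some 2) none = "" ↔ s.toList.length ≤ 2 := by
  rw [← String.toList_inj, PySem.Str.toList_slice]
  have : PySem.Chars.slice s.toList (some 2) none = List.drop 2 s.toList := by
    have := PySem.List.slice_from s.toList (a := 2) (by omega)
    simpa [PySem.Chars.slice] using this
  rw [this]
  simp [List.drop_eq_nil_iff]

-- a well-formed entity tag at the last position puts the input inside D_.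
theorem last_tag_D (l_ids : List Int) (voc : List String) (k : Nat)
    (hk : k < l_ids.length) (hlast : k + 1 = l_ids.length)
    (hne : PySem.List.pyGet? voc l_ids[k] ≠ none)
    (hI : PySem.Str.pyGet? ((PySem.List.pyGet? voc l_ids[k]).getD "") 0 = some 'B'
        ∨ PySem.Str.pyGet? ((PySem.List.pyGet? voc l_ids[k]).getD "") 0 = some 'I')
    (hsuf : PySem.Str.slice ((PySem.List.pyGet? voc l_ids[k]).getD "") (some 2) none ≠ "") :
    D_to_spans l_ids voc := by
  have hnil : l_ids ≠ [] := by
    intro h; rw [h] at hk; simp at hk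
  have hg : l_ids.getLast?.getD 0 = l_ids[k] := by
    rw [List.getLast?_eq_getElem?]
    have : l_ids.length - 1 = k := by omega
    rw [this]
    simp [List.getElem?_eq_getElem hk]
  have ht : pvTag voc (l_ids.getLast?.getD 0) = (PySem.List.pyGet? voc l_ids[k]).getD "" := by
    rw [hg]; exact pvTag_getD voc _ hne
  refine ⟨hnil, ?_, ?_⟩
  · rw [ht]
    have := (not_iff_not.mpr (slice2_empty_iff ((PySem.List.pyGet? voc l_ids[k]).getD ""))).mp hsuf
    omega
  · rw [ht]
    cases hI with
    | inl h => exact Or.inl (headD_of_strGet _ _ h)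
    | inr h => exact Or.inr (headD_of_strGet _ _ h)

-- under ¬D_ (and tags that exist), the continuation scan of a nonempty label
-- never reaches the end of the sequence.
theorem scan_lt (l_ids : List Int) (voc : List String) (hD : ¬ D_to_spans l_ids voc)
    (hPre : Pre_to_spans l_ids voc) :
    ∀ label, label ≠ "" → ∀ i, i < l_ids.length → altScan l_ids voc label i < l_ids.length := by
  intro label hl i
  induction hf : l_ids.length - i using Nat.strong_induction_on generalizing i with
  | _ n ih =>
    intro hi
    rw [altScan, dif_pos hi]
    split
    · next hc =>
      by_cases h1 : i + 1 < l_ids.length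
      · exact ih (l_ids.length - (i + 1)) (by omega) (i + 1) rfl h1
      · exfalso
        apply hD
        refine last_tag_D l_ids voc i hi (by omega) ?_ (Or.inr hc.1) (by rw [hc.2]; exact hl)
        intro hn
        exact hPre l_ids[i] (List.getElem_mem hi) (by rw [hn]; rfl)
    · exact hi

-- Main invariant: A's loop from position i agrees with B's outer walk, for each
-- shape of A's open-entity state (closed / open falsy "" / open nonempty label).
theorem mainLem (l_ids : List Int) (voc : List String)
    (hPre : Pre_to_spans l_ids voc) (hD : ¬ D_to_spans l_ids voc) :
    ∀ fuel i (spans : PySem.Dict Int (String × Int)), l_ids.length - i ≤ fuel →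
      ((loopA l_ids voc i (spans, none, none)).1 = altOuter l_ids voc i spans)
      ∧ (∀ st : Option Int, (loopA l_ids voc i (spans, some "", st)).1 = altOuter l_ids voc i spans)
      ∧ (∀ (start : Nat) (label : String), label ≠ "" →
          (loopA l_ids voc i (spans, some label, some (start : Int))).1 =
          altOuter l_ids voc (altScan l_ids voc label i)
            (if altScan l_ids voc label i < l_ids.length
             then spans.insert (start : Int) (label, ((altScan l_ids voc label i : Nat) : Int))
             else spans)) := by
  intro fuel
  induction fuel with
  | zero =>
    intro i spans hle
    have hn : ¬ i < l_ids.length := by omega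
    have hscan : ∀ label, altScan l_ids voc label i = i := by
      intro label; rw [altScan, dif_neg hn]
    refine ⟨?_, fun st => ?_, fun start label hl => ?_⟩ <;>
      rw [loopA, dif_neg hn, altOuter] <;> simp [hn, hscan]
  | succ fuel ih =>
    intro i spans hle
    by_cases hn : i < l_ids.length
    case neg =>
      have hscan : ∀ label, altScan l_ids voc label i = i := by
        intro label; rw [altScan, dif_neg hn]
      refine ⟨?_, fun st => ?_, fun start label hl => ?_⟩ <;>
        rw [loopA, dif_neg hn, altOuter] <;> simp [hn, hscan]
    case pos =>
      have hfl : l_ids.length - (i + 1) ≤ fuel := by omega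
      have hnone : PySem.List.pyGet? voc l_ids[i] ≠ none := by
        intro hx
        exact hPre l_ids[i] (List.getElem_mem hn) (by rw [hx]; rfl)
      set t := (PySem.List.pyGet? voc l_ids[i]).getD "" with ht
      set suf := PySem.Str.slice t (some 2) none with hsuf
      -- the continuation after A opens entity (suf, i) at position i, suf ≠ ""
      have open_case : ∀ spans' : PySem.Dict Int (String × Int),
          (PySem.Str.pyGet? t 0 = some 'B' ∨ PySem.Str.pyGet? t 0 = some 'I') →
          suf ≠ "" →
          (loopA l_ids voc (i + 1) (spans', some suf, some (i : Int))).1 =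
          altOuter l_ids voc i spans' := by
        intro spans' hBI hse
        have hjlt : altScan l_ids voc suf (i + 1) < l_ids.length := by
          by_cases h1 : i + 1 < l_ids.length
          · exact scan_lt l_ids voc hD hPre suf hse (i + 1) h1
          · exact absurd (last_tag_D l_ids voc i hn (by omega) hnone (ht ▸ hBI) (ht ▸ hsuf ▸ hse)) hD
        have hlen : 2 < PySem.Str.len t := by
          have := (not_iff_not.mpr (slice2_empty_iff t)).mp (hsuf ▸ hse)
          rw [PySem.Str.len_eq]
          omega
        conv_rhs => rw [altOuter]
        rw [dif_pos hn, if_pos ⟨ht ▸ hlen, ht ▸ hBI⟩, ← ht, ← hsuf]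
        have h3 := (ih (i + 1) spans' hfl).2.2 i suf hse
        rw [h3, if_pos hjlt]
      -- the continuation after A opens a falsy ("", i) entity: B skips token i
      have skip_case : ∀ spans' : PySem.Dict Int (String × Int),
          suf = "" →
          (loopA l_ids voc (i + 1) (spans', some suf, some (i : Int))).1 =
          altOuter l_ids voc i spans' := by
        intro spans' hse
        have hlen : ¬ 2 < PySem.Str.len t := by
          have := (slice2_empty_iff t).mp (hsuf ▸ hse)
          rw [PySem.Str.len_eq]
          omega
        conv_rhs => rw [altOuter]
        rw [dif_pos hn, if_neg (by rw [← ht]; exact fun hc => hlen hc.1)]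
        rw [hse]
        exact (ih (i + 1) spans' hfl).2.1 (some (i : Int))
      refine ⟨?_, fun st => ?_, fun start label hl => ?_⟩
      -- closed state
      · rw [loopA, dif_pos hn]
        by_cases hB : PySem.List.pyGet? t.toList 0 = some 'B'
        · have : stepA voc (spans, none, none) ((i : Int), l_ids[i]) = (spans, some suf, some (i : Int)) := by
            simp [stepA, ← ht, ← hsuf, hB, truthyA]
          rw [this]
          by_cases hse : suf = ""
          · exact skip_case spans hse
          · exact open_case spans (Or.inl (by simpa using hB)) hse
        · by_cases hI : PySem.List.pyGet? t.toList 0 = some 'I'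
          · have : stepA voc (spans, none, none) ((i : Int), l_ids[i]) = (spans, some suf, some (i : Int)) := by
              simp [stepA, ← ht, ← hsuf, hI, truthyA]
            rw [this]
            by_cases hse : suf = ""
            · exact skip_case spans hse
            · exact open_case spans (Or.inr (by simpa using hI)) hse
          · have hst : stepA voc (spans, none, none) ((i : Int), l_ids[i]) = (spans, none, none) := by
              simp [stepA, ← ht, hB, hI, truthyA]
            rw [hst, (ih (i + 1) spans hfl).1]
            conv_rhs => rw [altOuter]
            rw [dif_pos hn, if_neg (by simp [← ht, hB, hI])]
      -- open with falsy "" label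
      · rw [loopA, dif_pos hn]
        by_cases hB : PySem.List.pyGet? t.toList 0 = some 'B'
        · have : stepA voc (spans, some "", st) ((i : Int), l_ids[i]) = (spans, some suf, some (i : Int)) := by
            simp [stepA, ← ht, ← hsuf, hB, truthyA]
          rw [this]
          by_cases hse : suf = ""
          · exact skip_case spans hse
          · exact open_case spans (Or.inl (by simpa using hB)) hse
        · by_cases hI : PySem.List.pyGet? t.toList 0 = some 'I'
          · have : stepA voc (spans, some "", st) ((i : Int), l_ids[i]) = (spans, some suf, some (i : Int)) := by
              simp [stepA, ← ht, ← hsuf, hI, truthyA]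
            rw [this]
            by_cases hse : suf = ""
            · exact skip_case spans hse
            · exact open_case spans (Or.inr (by simpa using hI)) hse
          · have hst : stepA voc (spans, some "", st) ((i : Int), l_ids[i]) = (spans, some "", st) := by
              simp [stepA, ← ht, hB, hI, truthyA]
            rw [hst, (ih (i + 1) spans hfl).2.1 st]
            conv_rhs => rw [altOuter]
            rw [dif_pos hn, if_neg (by simp [← ht, hB, hI])]
      -- open with nonempty label
      · rw [loopA, dif_pos hn]
        by_cases hcont : PySem.List.pyGet? t.toList 0 = some 'I' ∧ suf = label
        · -- continuation: A leaves the state alone, B's scan steps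
          have hB : ¬ PySem.List.pyGet? t.toList 0 = some 'B' := by
            rw [hcont.1]; simp
          have hst : stepA voc (spans, some label, some (start : Int)) ((i : Int), l_ids[i])
              = (spans, some label, some (start : Int)) := by
            simp [stepA, ← ht, ← hsuf, hcont.1, truthyA, hl, hcont.2]
          have hscan : altScan l_ids voc label i = altScan l_ids voc label (i + 1) := by
            rw [altScan, dif_pos hn,
              if_pos (show _ ∧ _ from ⟨by simpa using hcont.1, by rw [← ht, ← hsuf, hcont.2]⟩)]
          rw [hst, (ih (i + 1) spans hfl).2.2 start label hl, hscan]
        · -- A closes the entity at i; B's scan stops at i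
          have hscan : altScan l_ids voc label i = i := by
            rw [altScan, dif_pos hn]
            split
            · next hc =>
              exact absurd ⟨by simpa using hc.1, by rw [hsuf, ht]; exact hc.2⟩ hcont
            · rfl
          rw [hscan, if_pos hn]
          set spans' := spans.insert (start : Int) (label, (i : Int)) with hsp
          by_cases hB : PySem.List.pyGet? t.toList 0 = some 'B'
          · have : stepA voc (spans, some label, some (start : Int)) ((i : Int), l_ids[i])
                = (spans', some suf, some (i : Int)) := by
              simp [stepA, ← ht, ← hsuf, hB, truthyA, hl, hsp]
            rw [this]
            by_cases hse : suf = ""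
            · exact skip_case spans' hse
            · exact open_case spans' (Or.inl (by simpa using hB)) hse
          · by_cases hI : PySem.List.pyGet? t.toList 0 = some 'I'
            · have hne : label ≠ suf := fun h => hcont ⟨hI, h.symm⟩
              have : stepA voc (spans, some label, some (start : Int)) ((i : Int), l_ids[i])
                  = (spans', some suf, some (i : Int)) := by
                simp [stepA, ← ht, ← hsuf, hI, truthyA, hl, hne, hsp]
              rw [this]
              by_cases hse : suf = ""
              · exact skip_case spans' hse
              · exact open_case spans' (Or.inr (by simpa using hI)) hse
            · have : stepA voc (spans, some label, some (start : Int)) ((i : Int), l_ids[i])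
                  = (spans', none, none) := by
                simp [stepA, ← ht, hB, hI, truthyA, hl, hsp]
              rw [this, (ih (i + 1) spans' hfl).1]
              conv_rhs => rw [altOuter]
              rw [dif_pos hn, if_neg (by simp [← ht, hB, hI])]

-- evaluation of B's port at the change witness (altScan/altOuter are
-- well-founded recursions, so `decide` cannot unfold them directly).
theorem altScan_witness : altScan [0] ["B-PER"] "PER" 1 = 1 := by
  rw [altScan]; simp

theorem alt_witness : to_spans_alt [0] ["B-PER"] = [(0, "PER", 1)] := by
  unfold to_spans_alt
  rw [altOuter]
  rw [dif_pos (by decide : 0 < ([0]:List Int).length)]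
  rw [if_pos (by refine ⟨?_, ?_⟩ <;> decide)]
  rw [show PySem.Str.slice ((PySem.List.pyGet? ["B-PER"] ([0]:List Int)[0]).getD "") (some 2) none = "PER" from by decide]
  rw [altScan_witness, altOuter]
  decide

-- ===== VERDICT (by name: the statements are the Claim_ definitions above) =====
theorem to_spans_spec : Claim_unchanged_to_spans := by
  intro l_ids voc _ hPre
  unfold Spec_to_spans
  intro hD
  unfold to_spans to_spans_alt
  have h0 : (PySem.List.enumerate l_ids).drop 0 = PySem.List.enumerate l_ids := rfl
  rw [← h0, foldl_drop_eq_loopA]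
  rw [(mainLem l_ids voc hPre hD l_ids.length 0 PySem.Dict.empty (by omega)).1]

theorem to_spans_changed : Claim_changed_to_spans := by
  unfold Claim_changed_to_spans
  refine ⟨by decide, by decide, by decide, by decide, alt_witness, by decide⟩
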